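-- pv_equiv track=rewrite | github.com/derekmartinnj/CIS-210-Assignment-4 | p41_alphapin.py | alphapinEncode
-- ===== SOURCE A (Python) =====
-- consonants = "bcdfghjklmnpqrstvwyz"
--
-- vowels = "aeiou"
--
-- def alphapinEncode(pin):
--     '''
--     (int) -> string
--
--     Convert given PIN into a formatted string of consonants and vowels
--
--     >>> alphapinEncode(4327)
--     'lohi'
--     >>> alphapinEncode(1298)
--     'dizo'
--     '''
--     # doctest.testmod()
--     code = ''
--     while (pin != 0):
--         lastTwo = pin % 100
--         consonant = consonants[(lastTwo // 5)] # convert lastTwo to letters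
--         vowel = vowels[(lastTwo % 5)]
--         code = (consonant + vowel + code) # add letters to beginning of 'code'
--         # pin = (pin - lastTwo) // 100
--         pin = pin // 100
--     return code
-- ===== SOURCE B (Python) =====
-- consonants = "bcdfghjklmnpqrstvwyz"
--
-- vowels = "aeiou"
--
-- def alphapinEncode(pin):
--     if pin == 0:
--         return ''
--     s = str(pin)
--     if len(s) % 2 == 1:
--         s = '0' + s
--     out = []
--     for i in range(0, len(s), 2):
--         n = int(s[i:i+2])
--         out.append(consonants[n // 5] + vowels[n % 5])
--     return ''.join(out)
-- ===== Notes on version B (the rewrite author's own statement) =====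
-- stated objective: alternative
-- what changed: B works on the decimal string representation: str(pin), left-padded with one '0' to even length, is split into forward 2-character slices each parsed with int() and mapped to a letter pair, replacing A's right-to-left %100 // //100 arithmetic loop with string prepending.
import Mathlib
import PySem

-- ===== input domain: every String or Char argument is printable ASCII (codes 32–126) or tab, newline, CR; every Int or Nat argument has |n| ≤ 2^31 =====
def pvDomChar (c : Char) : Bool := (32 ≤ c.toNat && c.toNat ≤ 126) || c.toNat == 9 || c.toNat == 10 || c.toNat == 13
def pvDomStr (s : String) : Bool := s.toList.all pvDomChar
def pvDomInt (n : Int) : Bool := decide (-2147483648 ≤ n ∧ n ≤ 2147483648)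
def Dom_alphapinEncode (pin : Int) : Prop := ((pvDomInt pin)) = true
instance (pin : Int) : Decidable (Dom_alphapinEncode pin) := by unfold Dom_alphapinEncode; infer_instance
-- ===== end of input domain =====

-- B re-implements the encoder over the decimal string: str(pin) is padded to even length and
-- split into forward 2-char slices, instead of A's right-to-left %100 // //100 arithmetic loop
-- with string prepending (objective: alternative; same cost).

-- ===== PORT A =====
def pvConsonants : List Char := ['b','c','d','f','g','h','j','k','l','m','n','p','q','r','s','t','v','w','y','z']

def pvVowels : List Char := ['a','e','i','o','u']

-- 'while pin != 0' loop of A; for pin < 0 the Python loop never terminates (pin // 100 stalls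
-- at -1), so the pin < 0 branch is only a totality guard outside Pre_.
def alphapinLoopA (pin : Int) (code : List Char) : List Char :=
  if pin = 0 then code
  else if pin < 0 then code
  else
    let lastTwo := PySem.Int.mod pin 100
    let consonant := PySem.List.pyGetD pvConsonants (PySem.Int.floordiv lastTwo 5) ' '
    let vowel := PySem.List.pyGetD pvVowels (PySem.Int.mod lastTwo 5) ' '
    alphapinLoopA (PySem.Int.floordiv pin 100) (consonant :: vowel :: code)
termination_by pin.toNat
decreasing_by
  rename_i h0 hneg
  rw [PySem.Int.floordiv_eq_ediv_of_pos (by norm_num : (0:Int) < 100)]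
  omega

def alphapinEncode (pin : Int) : String := String.ofList (alphapinLoopA pin [])

-- ===== PORT B =====
def alphapinEncode_alt (pin : Int) : String :=
  if pin = 0 then "" else
  let s0 := PySem.Int.toChars pin
  let s := if PySem.Int.mod (PySem.List.len s0) 2 = 1 then '0' :: s0 else s0
  let out := (PySem.List.pyRange 0 (PySem.List.len s) 2).foldl
    (fun out i =>
      -- n = int(s[i:i+2]); the slice is always two decimal digits inside Pre_, so int() never raises
      let n := (PySem.Int.ofChars? (PySem.List.slice s (some i) (some (i + 2)))).getD 0
      out ++ [[PySem.List.pyGetD pvConsonants (PySem.Int.floordiv n 5) ' ',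
               PySem.List.pyGetD pvVowels (PySem.Int.mod n 5) ' ']]) ([] : List (List Char))
  String.ofList out.flatten  -- ''.join(out)

-- ===== PRECONDITION & SPEC =====
-- Pre_ excludes negative pins: there A's 'while pin != 0' loop never terminates (pin // 100 stalls at -1).
def Pre_alphapinEncode (pin : Int) : Prop := 0 ≤ pin
instance (pin : Int) : Decidable (Pre_alphapinEncode pin) := by unfold Pre_alphapinEncode; infer_instance
def pvWitness_alphapinEncode : Int := (4327)

def Spec_alphapinEncode (pin : Int) (out : String) : Prop := out = alphapinEncode_alt pin
instance (pin : Int) (out : String) : Decidable (Spec_alphapinEncode pin out) := by unfold Spec_alphapinEncode; infer_instance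

-- ===== CLAIM (what is proved, stated in full; the proofs are below) =====
def Claim_equal_alphapinEncode : Prop := ∀ (pin : Int), Dom_alphapinEncode pin → Pre_alphapinEncode pin → Spec_alphapinEncode pin (alphapinEncode pin)

-- ===== LEMMAS AND PROOFS =====

-- the letter pair produced for one two-digit group k (0 ≤ k < 100)
def pvPairN (k : Nat) : List Char := [pvConsonants.getD (k / 5) ' ', pvVowels.getD (k % 5) ' ']

-- the common semantics: groups of two decimal digits, most significant group first
def pvG (n : Nat) : List Char :=
  if h : n = 0 then [] else pvG (n / 100) ++ pvPairN (n % 100)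
decreasing_by exact Nat.div_lt_self (Nat.pos_of_ne_zero h) (by norm_num)

-- big-endian decimal digit characters of n (what Nat.toDigits 10 computes)
def pvBigEnd (n : Nat) : List Char :=
  if h : n < 10 then [Nat.digitChar n] else pvBigEnd (n / 10) ++ [Nat.digitChar (n % 10)]
decreasing_by exact Nat.div_lt_self (by omega) (by norm_num)

-- B's left-pad to even length
def pvPad (t : List Char) : List Char := if t.length % 2 = 1 then '0' :: t else t

-- an even-length char list cut into consecutive pairs
def pvChunks : List Char → List (List Char)
  | a :: b :: t => [a, b] :: pvChunks t
  | _ => []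

-- B's loop body on one two-char slice
def pvParse (c : List Char) : List Char :=
  let n := (PySem.Int.ofChars? c).getD 0
  [PySem.List.pyGetD pvConsonants (PySem.Int.floordiv n 5) ' ',
   PySem.List.pyGetD pvVowels (PySem.Int.mod n 5) ' ']

lemma loopA_eq (m : Nat) : ∀ code : List Char, alphapinLoopA (m : Int) code = pvG m ++ code := by
  induction m using Nat.strong_induction_on with
  | _ m ih =>
    intro code
    rcases Nat.eq_zero_or_pos m with h0 | h0
    · subst h0; rw [alphapinLoopA, pvG]; simp
    · have h1 : ¬ ((m : Int) = 0) := by omega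
      have h2 : ¬ ((m : Int) < 0) := by omega
      have e1 : PySem.Int.mod (m : Int) 100 = ((m % 100 : Nat) : Int) := by
        rw [PySem.Int.mod_eq_emod_of_pos (a := _) (by norm_num)]; omega
      have e2 : PySem.Int.floordiv (m : Int) 100 = ((m / 100 : Nat) : Int) := by
        rw [PySem.Int.floordiv_eq_ediv_of_pos (by norm_num)]; omega
      have e3 : PySem.Int.floordiv ((m % 100 : Nat) : Int) 5 = ((m % 100 / 5 : Nat) : Int) := by
        rw [PySem.Int.floordiv_eq_ediv_of_pos (by norm_num)]; omega
      have e4 : PySem.Int.mod ((m % 100 : Nat) : Int) 5 = ((m % 100 % 5 : Nat) : Int) := by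
        rw [PySem.Int.mod_eq_emod_of_pos (a := _) (by norm_num)]; omega
      rw [alphapinLoopA]
      simp only [h1, h2, if_false, e1, e2, e3, e4, PySem.List.pyGetD_natCast]
      rw [ih (m / 100) (Nat.div_lt_self h0 (by norm_num))]
      conv_rhs => rw [pvG]
      simp [Nat.pos_iff_ne_zero.mp h0, pvPairN]

lemma toDigitsCore_eq (f : Nat) : ∀ (n : Nat) (l : List Char), n < 10 ^ f → 0 < f →
    Nat.toDigitsCore 10 f n l = pvBigEnd n ++ l := by
  induction f with
  | zero => intro n l h hf; omega
  | succ f ih =>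
    intro n l h _
    rw [Nat.toDigitsCore]
    by_cases h10 : n / 10 = 0
    · rw [if_pos h10, pvBigEnd]
      have hlt : n < 10 := by omega
      rw [dif_pos hlt, Nat.mod_eq_of_lt hlt]
      simp
    · rw [if_neg h10]
      have hn : 10 ≤ n := by omega
      have hf1 : 0 < f := by
        by_contra hc
        have : f = 0 := by omega
        subst this
        simp at h
        omega
      have hf : n / 10 < 10 ^ f := Nat.div_lt_of_lt_mul (by rw [← pow_succ']; omega)
      rw [ih (n / 10) _ hf hf1]
      conv_rhs => rw [pvBigEnd]
      rw [dif_neg (by omega : ¬ n < 10)]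
      simp

lemma toChars_natCast (m : Nat) : PySem.Int.toChars (m : Int) = pvBigEnd m := by
  have h1 : ¬ ((m : Int) < 0) := by omega
  have h2 : (m : Int).toNat = m := by omega
  rw [PySem.Int.toChars, if_neg h1, h2, Nat.toDigits]
  rw [toDigitsCore_eq (m + 1) m []
    (lt_of_lt_of_le (Nat.lt_pow_self (by norm_num)) (Nat.pow_le_pow_right (by norm_num) (by omega)))
    (by omega)]
  simp

lemma pad_length_even (t : List Char) : (pvPad t).length % 2 = 0 := by
  unfold pvPad; split_ifs with h
  · simp only [List.length_cons]; omega
  · omega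

lemma pad_append_two (t : List Char) (x y : Char) : pvPad (t ++ [x, y]) = pvPad t ++ [x, y] := by
  unfold pvPad
  have h : (t ++ [x, y]).length % 2 = 1 ↔ t.length % 2 = 1 := by
    simp only [List.length_append, List.length_cons, List.length_nil]; omega
  split_ifs with h1 h2 h2 <;> simp_all

lemma chunks_append_two : ∀ (u : List Char) (x y : Char), u.length % 2 = 0 →
    pvChunks (u ++ [x, y]) = pvChunks u ++ [[x, y]]
  | [], x, y, _ => rfl
  | [a], x, y, h => by simp at h
  | a :: b :: t, x, y, h => by
    simp only [List.cons_append, pvChunks]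
    rw [chunks_append_two t x y (by simp only [List.length_cons] at h; omega)]

lemma bigEnd_small (m : Nat) (h : m < 100) :
    pvPad (pvBigEnd m) = [Nat.digitChar (m / 10), Nat.digitChar (m % 10)] := by
  by_cases h10 : m < 10
  · rw [pvBigEnd, dif_pos h10, pvPad]
    simp [Nat.div_eq_of_lt h10, Nat.mod_eq_of_lt h10]
    rfl
  · rw [pvBigEnd, dif_neg h10, pvBigEnd, dif_pos (by omega : m / 10 < 10), pvPad]
    simp

lemma bigEnd_big (m : Nat) (h : 100 ≤ m) :
    pvBigEnd m = pvBigEnd (m / 100) ++ [Nat.digitChar (m / 10 % 10), Nat.digitChar (m % 10)] := by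
  rw [pvBigEnd, dif_neg (by omega : ¬ m < 10), pvBigEnd, dif_neg (by omega : ¬ m / 10 < 10),
    Nat.div_div_eq_div_mul]
  simp

lemma parse_digits_fin : ∀ a b : Fin 10,
    pvParse [Nat.digitChar a, Nat.digitChar b] = pvPairN (10 * a + b) := by decide

lemma parse_digits (a b : Nat) (ha : a < 10) (hb : b < 10) :
    pvParse [Nat.digitChar a, Nat.digitChar b] = pvPairN (10 * a + b) :=
  parse_digits_fin ⟨a, ha⟩ ⟨b, hb⟩

lemma chunks_pad_bigEnd : ∀ m : Nat, 0 < m →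
    ((pvChunks (pvPad (pvBigEnd m))).map pvParse).flatten = pvG m := by
  intro m
  induction m using Nat.strong_induction_on with
  | _ m ih =>
    intro hm
    by_cases h : m < 100
    · rw [bigEnd_small m h]
      show (pvParse [Nat.digitChar (m / 10), Nat.digitChar (m % 10)] ++ []) = pvG m
      rw [parse_digits _ _ (by omega) (by omega),
        show 10 * (m / 10) + m % 10 = m from by omega]
      conv_rhs => rw [pvG]
      rw [dif_neg (by omega : ¬ m = 0), show m / 100 = 0 from by omega,
        show m % 100 = m from by omega, pvG]
      simp
    · have h100 : 100 ≤ m := le_of_not_gt h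
      rw [bigEnd_big m h100, pad_append_two, chunks_append_two _ _ _ (pad_length_even _)]
      simp only [List.map_append, List.map_cons, List.map_nil, List.flatten_append,
        List.flatten_cons, List.flatten_nil, List.append_nil]
      rw [ih (m / 100) (Nat.div_lt_self hm (by norm_num)) (by omega),
        parse_digits _ _ (by omega) (by omega),
        show 10 * (m / 10 % 10) + m % 10 = m % 100 from by omega]
      conv_rhs => rw [pvG]
      rw [dif_neg (by omega : ¬ m = 0)]

lemma chunkmap (f : List Char → List Char) (k : Nat) : ∀ s : List Char, s.length = 2 * k →
    (List.range k).map (fun j => f ((s.drop (2 * j)).take 2)) = (pvChunks s).map f := by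
  induction k with
  | zero =>
    intro s hs
    have : s = [] := List.eq_nil_of_length_eq_zero (by omega)
    subst this
    simp [pvChunks]
  | succ k ih =>
    intro s hs
    rcases s with _ | ⟨a, s⟩
    · simp at hs
    rcases s with _ | ⟨b, t⟩
    · simp at hs; omega
    simp only [List.length_cons] at hs
    rw [List.range_succ_eq_map]
    simp only [List.map_cons, List.map_map, pvChunks]
    refine congrArg₂ List.cons rfl ?_
    rw [← ih t (by omega)]
    apply List.map_congr_left
    intro j hj
    simp only [Function.comp_apply]
    rw [show 2 * Nat.succ j = 2 * j + 1 + 1 from by omega, List.drop_succ_cons,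
      List.drop_succ_cons]

lemma bigEnd_ne_nil (m : Nat) : pvBigEnd m ≠ [] := by
  rw [pvBigEnd]; split_ifs <;> simp

lemma alt_eq (m : Nat) (hm : 0 < m) :
    alphapinEncode_alt (m : Int) = String.ofList (((pvChunks (pvPad (pvBigEnd m))).map pvParse).flatten) := by
  unfold alphapinEncode_alt
  rw [if_neg (by omega : ¬ ((m : Int) = 0)), toChars_natCast]
  have hs : (if PySem.Int.mod (PySem.List.len (pvBigEnd m)) 2 = 1 then '0' :: pvBigEnd m
      else pvBigEnd m) = pvPad (pvBigEnd m) := by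
    have hc : (PySem.Int.mod (PySem.List.len (pvBigEnd m)) 2 = 1) ↔ ((pvBigEnd m).length % 2 = 1) := by
      rw [PySem.List.len_eq, PySem.Int.mod_eq_emod_of_pos (a := _) (by norm_num)]
      omega
    rw [pvPad]
    by_cases h : (pvBigEnd m).length % 2 = 1
    · rw [if_pos (hc.mpr h), if_pos h]
    · rw [if_neg (fun hx => h (hc.mp hx)), if_neg h]
  show String.ofList ((List.foldl
      (fun (out : List (List Char)) (i : Int) =>
        out ++ [pvParse (PySem.List.slice
          (if PySem.Int.mod (PySem.List.len (pvBigEnd m)) 2 = 1 then '0' :: pvBigEnd m else pvBigEnd m)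
          (some i) (some (i + 2)))])
      [] (PySem.List.pyRange 0
        (PySem.List.len (if PySem.Int.mod (PySem.List.len (pvBigEnd m)) 2 = 1 then '0' :: pvBigEnd m
          else pvBigEnd m)) 2)).flatten) = _
  rw [hs]
  set s := pvPad (pvBigEnd m) with hsdef
  have hev : s.length % 2 = 0 := pad_length_even _
  have hne : s ≠ [] := by
    rw [hsdef, pvPad]
    split_ifs <;> simp [bigEnd_ne_nil]
  set k := s.length / 2 with hk
  have hlen : s.length = 2 * k := by omega
  show String.ofList ((List.foldl
      (fun (out : List (List Char)) (i : Int) =>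
        out ++ [pvParse (PySem.List.slice s (some i) (some (i + 2)))])
      [] (PySem.List.pyRange 0 (PySem.List.len s) 2)).flatten) = _
  rw [PySem.List.foldl_append_singleton_eq_map, PySem.List.len_eq,
    PySem.List.pyRange_of_pos 0 (s.length : Int) (by norm_num : (0:Int) < 2)]
  rw [if_pos (by simp [List.length_pos_iff, hne] : (0:Int) < (s.length : Int))]
  rw [show (((s.length : Int) - 0 + 2 - 1) / 2).toNat = k from by omega]
  simp only [List.nil_append, List.map_map]
  rw [← chunkmap pvParse k s hlen]
  apply congrArg
  apply congrArg
  apply List.map_congr_left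
  intro j hj
  simp only [Function.comp_apply, zero_add]
  have e1 : (2 : Int) * (j : Int) = ((2 * j : Nat) : Int) := by push_cast; ring
  have e2 : (2 : Int) * (j : Int) + 2 = ((2 * j : Nat) : Int) + ((2 : Nat) : Int) := by push_cast; ring
  rw [e2, e1, PySem.List.slice_natCast_add]

-- ===== VERDICT (by name: the statement is the Claim_ definition above) =====
theorem alphapinEncode_spec : Claim_equal_alphapinEncode := by
  intro pin hdom hpre
  unfold Spec_alphapinEncode
  obtain ⟨m, rfl⟩ : ∃ m : Nat, pin = (m : Int) := ⟨pin.toNat, (Int.toNat_of_nonneg hpre).symm⟩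
  rcases Nat.eq_zero_or_pos m with hm | hm
  · subst hm
    show alphapinEncode 0 = alphapinEncode_alt 0
    unfold alphapinEncode alphapinEncode_alt
    rw [alphapinLoopA]
    simp
  · rw [alt_eq m hm, chunks_pad_bigEnd m hm]
    simp [alphapinEncode, loopA_eq]
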